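-- pv_equiv track=rewrite | github.com/adibaejaz/NCMCounterfactuals | src/masked_experiment.py | _equiv_non_collider_triples
-- ===== SOURCE A (Python) =====
-- import itertools
--
-- def _equiv_skeleton_neighbors(vertices, directed_edges, undirected_edges):
--     neighbors = {v: set() for v in vertices}
--     for src, dst in directed_edges:
--         neighbors[src].add(dst)
--         neighbors[dst].add(src)
--     for src, dst in undirected_edges:
--         neighbors[src].add(dst)
--         neighbors[dst].add(src)
--     return neighbors
--
-- def _equiv_unshielded_colliders(vertices, directed_edges, skeleton_neighbors):
--     parents = {v: set() for v in vertices}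
--     for src, dst in directed_edges:
--         parents[dst].add(src)
--
--     colliders = set()
--     for mid in vertices:
--         for left, right in itertools.combinations(sorted(parents[mid]), 2):
--             if right not in skeleton_neighbors[left]:
--                 colliders.add((left, mid, right))
--     return colliders
--
-- def _equiv_non_collider_triples(vertices, directed_edges, undirected_edges):
--     skeleton_neighbors = _equiv_skeleton_neighbors(vertices, directed_edges, undirected_edges)
--     target_colliders = _equiv_unshielded_colliders(vertices, directed_edges, skeleton_neighbors)
--     non_colliders = []
--     for mid in vertices:
--         for left, right in itertools.combinations(sorted(skeleton_neighbors[mid]), 2):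
--             if right in skeleton_neighbors[left]:
--                 continue
--             triple = (left, mid, right)
--             if triple not in target_colliders:
--                 non_colliders.append(triple)
--     return non_colliders
-- ===== SOURCE B (Python) =====
-- import itertools
--
-- def _equiv_non_collider_triples(vertices, directed_edges, undirected_edges):
--     neighbors = {v: set() for v in vertices}
--     for src, dst in directed_edges:
--         neighbors[src].add(dst)
--         neighbors[dst].add(src)
--     for src, dst in undirected_edges:
--         neighbors[src].add(dst)
--         neighbors[dst].add(src)
--     parents = {v: set() for v in vertices}
--     for src, dst in directed_edges:
--         parents[dst].add(src)
--     non_colliders = []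
--     for mid in vertices:
--         for left, right in itertools.combinations(sorted(neighbors[mid]), 2):
--             if right in neighbors[left]:
--                 continue
--             if not (left in parents[mid] and right in parents[mid]):
--                 non_colliders.append((left, mid, right))
--     return non_colliders
-- ===== Notes on version B (the rewrite author's own statement) =====
-- stated objective: simpler
-- what changed: B eliminates A's separate unshielded-collider-set construction pass (and the membership test against it) and instead classifies each unshielded triple inline in the single enumeration loop: a triple is a non-collider unless both endpoints are parents of mid.
import Mathlib
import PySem

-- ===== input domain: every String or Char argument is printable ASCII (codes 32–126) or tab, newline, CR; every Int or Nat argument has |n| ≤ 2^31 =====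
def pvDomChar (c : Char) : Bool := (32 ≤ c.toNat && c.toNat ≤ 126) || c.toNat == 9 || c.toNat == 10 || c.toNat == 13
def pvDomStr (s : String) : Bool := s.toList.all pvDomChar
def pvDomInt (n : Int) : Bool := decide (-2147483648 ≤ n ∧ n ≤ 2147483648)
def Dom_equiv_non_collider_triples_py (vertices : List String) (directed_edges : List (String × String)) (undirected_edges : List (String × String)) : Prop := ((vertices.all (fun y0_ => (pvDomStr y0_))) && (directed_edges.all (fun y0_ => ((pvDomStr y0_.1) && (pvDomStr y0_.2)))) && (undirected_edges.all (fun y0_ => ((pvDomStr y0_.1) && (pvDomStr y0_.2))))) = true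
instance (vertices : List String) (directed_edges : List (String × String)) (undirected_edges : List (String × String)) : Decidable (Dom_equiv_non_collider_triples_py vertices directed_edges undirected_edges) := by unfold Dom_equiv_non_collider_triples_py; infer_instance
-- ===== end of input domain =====

-- B drops A's separate unshielded-collider-set construction pass and classifies each
-- unshielded triple inline from the parents dict (objective: simpler, one pass instead of two).

-- ===== PORT A =====
-- shared helper of both Pythons: {v: set() for v in vertices}
def pvEmptySets (vertices : List String) : PySem.Dict String (PySem.Set String) :=
  vertices.foldl (fun d v => d.insert v PySem.Set.empty) PySem.Dict.empty

-- one directed/undirected edge added to the skeleton-neighbors dict (both directions)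
def pvNbrStep (d : PySem.Dict String (PySem.Set String)) (e : String × String) :
    PySem.Dict String (PySem.Set String) :=
  let d1 := d.insert e.1 (PySem.Set.add (d.getD e.1 []) e.2)
  d1.insert e.2 (PySem.Set.add (d1.getD e.2 []) e.1)

-- _equiv_skeleton_neighbors (shared text of both Pythons)
def pvSkeleton (vertices : List String) (directed_edges undirected_edges : List (String × String)) :
    PySem.Dict String (PySem.Set String) :=
  let d := directed_edges.foldl pvNbrStep (pvEmptySets vertices)
  undirected_edges.foldl pvNbrStep d

-- parents dict: for src, dst in directed_edges: parents[dst].add(src)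
def pvParents (vertices : List String) (directed_edges : List (String × String)) :
    PySem.Dict String (PySem.Set String) :=
  directed_edges.foldl (fun d e => d.insert e.2 (PySem.Set.add (d.getD e.2 []) e.1)) (pvEmptySets vertices)

-- itertools.combinations(xs, 2)
def pvPairs2 {α : Type} : List α → List (α × α)
  | [] => []
  | x :: r => r.map (fun y => (x, y)) ++ pvPairs2 r

-- _equiv_unshielded_colliders (A only)
def pvColliders (vertices : List String) (parents skel : PySem.Dict String (PySem.Set String)) :
    PySem.Set (String × String × String) :=
  vertices.foldl (fun cs mid =>
    (pvPairs2 (PySem.List.sorted (parents.getD mid []) (fun x => x) false)).foldl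
      (fun cs p =>
        if (skel.getD p.1 []).contains p.2 then cs
        else PySem.Set.add cs (p.1, mid, p.2)) cs) PySem.Set.empty

def equiv_non_collider_triples_py (vertices : List String) (directed_edges : List (String × String)) (undirected_edges : List (String × String)) : List (String × String × String) :=
  let skel := pvSkeleton vertices directed_edges undirected_edges
  let colliders := pvColliders vertices (pvParents vertices directed_edges) skel
  vertices.foldl (fun acc mid =>
    (pvPairs2 (PySem.List.sorted (skel.getD mid []) (fun x => x) false)).foldl
      (fun acc p =>
        if (skel.getD p.1 []).contains p.2 then acc
        else if colliders.contains (p.1, mid, p.2) then acc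
        else acc ++ [(p.1, mid, p.2)]) acc) []

-- ===== PORT B =====
def equiv_non_collider_triples_py_alt (vertices : List String) (directed_edges : List (String × String)) (undirected_edges : List (String × String)) : List (String × String × String) :=
  let skel := pvSkeleton vertices directed_edges undirected_edges
  let parents := pvParents vertices directed_edges
  vertices.foldl (fun acc mid =>
    (pvPairs2 (PySem.List.sorted (skel.getD mid []) (fun x => x) false)).foldl
      (fun acc p =>
        if (skel.getD p.1 []).contains p.2 then acc
        else if !((parents.getD mid []).contains p.1 && (parents.getD mid []).contains p.2) then
          acc ++ [(p.1, mid, p.2)]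
        else acc) acc) []

-- ===== PRECONDITION & SPEC =====
-- Pre_: every edge endpoint must occur in vertices; otherwise the Python (A and B alike)
-- raises KeyError on the dict lookup.
def Pre_equiv_non_collider_triples_py (vertices : List String) (directed_edges : List (String × String)) (undirected_edges : List (String × String)) : Prop :=
  (∀ e ∈ directed_edges, e.1 ∈ vertices ∧ e.2 ∈ vertices) ∧
  (∀ e ∈ undirected_edges, e.1 ∈ vertices ∧ e.2 ∈ vertices)
instance (vertices : List String) (directed_edges : List (String × String)) (undirected_edges : List (String × String)) : Decidable (Pre_equiv_non_collider_triples_py vertices directed_edges undirected_edges) := by unfold Pre_equiv_non_collider_triples_py; infer_instance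

def pvWitness_equiv_non_collider_triples_py : List String × (List (String × String)) × (List (String × String)) :=
  (["a", "b", "c"], [("a", "b")], [("b", "c")])

def Spec_equiv_non_collider_triples_py (vertices : List String) (directed_edges : List (String × String)) (undirected_edges : List (String × String)) (out : List (String × String × String)) : Prop := out = equiv_non_collider_triples_py_alt vertices directed_edges undirected_edges
instance (vertices : List String) (directed_edges : List (String × String)) (undirected_edges : List (String × String)) (out : List (String × String × String)) : Decidable (Spec_equiv_non_collider_triples_py vertices directed_edges undirected_edges out) := by unfold Spec_equiv_non_collider_triples_py; infer_instance

-- ===== CLAIM (what is proved, stated in full; the proofs are below) =====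
def Claim_equal_equiv_non_collider_triples_py : Prop := ∀ (vertices : List String) (directed_edges : List (String × String)) (undirected_edges : List (String × String)), Dom_equiv_non_collider_triples_py vertices directed_edges undirected_edges → Pre_equiv_non_collider_triples_py vertices directed_edges undirected_edges → Spec_equiv_non_collider_triples_py vertices directed_edges undirected_edges (equiv_non_collider_triples_py vertices directed_edges undirected_edges)

-- ===== LEMMAS AND PROOFS =====

-- every value of a dict built by the set-valued insert loops is Nodup
def pvAllNodup (d : PySem.Dict String (PySem.Set String)) : Prop :=
  ∀ k, (d.getD k ([] : PySem.Set String)).Nodup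

theorem pvAllNodup_insert (d : PySem.Dict String (PySem.Set String)) (k : String)
    (s : PySem.Set String) (hd : pvAllNodup d) (hs : s.Nodup) : pvAllNodup (d.insert k s) := by
  intro k'
  rw [PySem.Dict.getD_insert]
  split_ifs with h
  · exact hs
  · exact hd k'

theorem pvAllNodup_insFold (l : List String) (d : PySem.Dict String (PySem.Set String))
    (hd : pvAllNodup d) : pvAllNodup (l.foldl (fun d v => d.insert v PySem.Set.empty) d) := by
  induction l generalizing d with
  | nil => exact hd
  | cons v t ih => exact ih _ (pvAllNodup_insert _ _ _ hd List.nodup_nil)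

theorem pvAllNodup_emptySets (vertices : List String) : pvAllNodup (pvEmptySets vertices) := by
  unfold pvEmptySets
  apply pvAllNodup_insFold
  intro k
  simp [PySem.Dict.getD_empty]

theorem pvAllNodup_nbrFold (l : List (String × String)) (d : PySem.Dict String (PySem.Set String))
    (hd : pvAllNodup d) : pvAllNodup (l.foldl pvNbrStep d) := by
  induction l generalizing d with
  | nil => exact hd
  | cons e t ih =>
      apply ih
      unfold pvNbrStep
      apply pvAllNodup_insert
      · exact pvAllNodup_insert _ _ _ hd (PySem.Set.nodup_add _ _ (hd e.1))
      · exact PySem.Set.nodup_add _ _ (pvAllNodup_insert _ _ _ hd (PySem.Set.nodup_add _ _ (hd e.1)) e.2)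

theorem pvAllNodup_skeleton (vertices : List String) (de ue : List (String × String)) :
    pvAllNodup (pvSkeleton vertices de ue) := by
  unfold pvSkeleton
  exact pvAllNodup_nbrFold _ _ (pvAllNodup_nbrFold _ _ (pvAllNodup_emptySets vertices))

theorem pvAllNodup_parFold (l : List (String × String)) (d : PySem.Dict String (PySem.Set String))
    (hd : pvAllNodup d) :
    pvAllNodup (l.foldl (fun d e => d.insert e.2 (PySem.Set.add (d.getD e.2 []) e.1)) d) := by
  induction l generalizing d with
  | nil => exact hd
  | cons e t ih => exact ih _ (pvAllNodup_insert _ _ _ hd (PySem.Set.nodup_add _ _ (hd e.2)))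

theorem pvAllNodup_parents (vertices : List String) (de : List (String × String)) :
    pvAllNodup (pvParents vertices de) := by
  unfold pvParents
  exact pvAllNodup_parFold _ _ (pvAllNodup_emptySets vertices)

-- sorted of a Nodup list (identity key) is strictly increasing
theorem pvSorted_strict (xs : List String) (hx : xs.Nodup) :
    (PySem.List.sorted xs (fun x => x) false).Pairwise (· < ·) := by
  have hle := PySem.List.sorted_pairwise xs (fun x => x)
  have hnd : (PySem.List.sorted xs (fun x => x) false).Nodup :=
    (PySem.List.sorted_perm xs (fun x => x) false).nodup_iff.mpr hx
  have := List.Pairwise.and hle hnd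
  exact this.imp (fun h => lt_of_le_of_ne h.1 h.2)

-- membership in combinations(xs, 2): forward always, full iff when xs is strictly sorted
theorem pvMem_pairs2 {α : Type} (xs : List α) (a b : α) :
    (a, b) ∈ pvPairs2 xs → a ∈ xs ∧ b ∈ xs := by
  induction xs with
  | nil => simp [pvPairs2]
  | cons x r ih =>
      intro h
      simp only [pvPairs2, List.mem_append, List.mem_map] at h
      rcases h with ⟨y, hy, he⟩ | h
      · cases he; exact ⟨by simp, List.mem_cons_of_mem _ hy⟩
      · exact ⟨List.mem_cons_of_mem _ (ih h).1, List.mem_cons_of_mem _ (ih h).2⟩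

theorem pvMem_pairs2_lt (xs : List String) (hx : xs.Pairwise (· < ·)) (a b : String) :
    (a, b) ∈ pvPairs2 xs ↔ a ∈ xs ∧ b ∈ xs ∧ a < b := by
  induction xs with
  | nil => simp [pvPairs2]
  | cons x r ih =>
      have hxr : ∀ y ∈ r, x < y := (List.pairwise_cons.mp hx).1
      have hr := ih (List.pairwise_cons.mp hx).2
      simp only [pvPairs2, List.mem_append, List.mem_map, List.mem_cons]
      constructor
      · rintro (⟨y, hy, he⟩ | h)
        · cases he; exact ⟨Or.inl rfl, Or.inr hy, hxr _ hy⟩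
        · rcases hr.mp h with ⟨ha, hb, hab⟩
          exact ⟨Or.inr ha, Or.inr hb, hab⟩
      · rintro ⟨ha, hb, hab⟩
        rcases ha with rfl | ha
        · rcases hb with rfl | hb
          · exact absurd hab (lt_irrefl _)
          · exact Or.inl ⟨b, hb, rfl⟩
        · rcases hb with rfl | hb
          · exact absurd ((hxr _ ha).trans hab) (lt_irrefl _)
          · exact Or.inr (hr.mpr ⟨ha, hb, hab⟩)
      
-- membership in a conditional Set.add fold
theorem pvMem_condFold {α β : Type} [BEq β] [LawfulBEq β] (l : List α)
    (c : α → Bool) (f : α → β) (s0 : PySem.Set β) (y : β) :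
    y ∈ l.foldl (fun s x => if c x then s else PySem.Set.add s (f x)) s0 ↔
      y ∈ s0 ∨ ∃ x ∈ l, c x = false ∧ y = f x := by
  induction l generalizing s0 with
  | nil => simp
  | cons x t ih =>
      rw [List.foldl_cons, ih]
      by_cases h : c x
      · simp [h]
        try tauto
      · simp only [Bool.not_eq_true] at h
        simp [h, PySem.Set.mem_add]
        tauto

-- characterisation of membership in A's collider set
theorem pvMem_colliders (vertices : List String) (parents skel : PySem.Dict String (PySem.Set String))
    (y : String × String × String) :
    y ∈ pvColliders vertices parents skel ↔
      ∃ mid ∈ vertices, ∃ p ∈ pvPairs2 (PySem.List.sorted (parents.getD mid []) (fun x => x) false),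
        (skel.getD p.1 []).contains p.2 = false ∧ y = (p.1, mid, p.2) := by
  unfold pvColliders
  have key : ∀ (v : List String) (s0 : PySem.Set (String × String × String)),
      y ∈ v.foldl (fun cs mid =>
        (pvPairs2 (PySem.List.sorted (parents.getD mid []) (fun x => x) false)).foldl
          (fun cs p => if (skel.getD p.1 []).contains p.2 then cs
            else PySem.Set.add cs (p.1, mid, p.2)) cs) s0 ↔
      y ∈ s0 ∨ ∃ mid ∈ v, ∃ p ∈ pvPairs2 (PySem.List.sorted (parents.getD mid []) (fun x => x) false),
        (skel.getD p.1 []).contains p.2 = false ∧ y = (p.1, mid, p.2) := by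
    intro v
    induction v with
    | nil => simp
    | cons mid t ih =>
        intro s0
        rw [List.foldl_cons, ih,
          pvMem_condFold _ (fun p : String × String => (skel.getD p.1 []).contains p.2)
            (fun p : String × String => (p.1, mid, p.2)) s0 y]
        simp only [List.mem_cons]
        constructor
        · rintro ((h | ⟨p, hp, hc, hy⟩) | ⟨m, hm, hrest⟩)
          · exact Or.inl h
          · exact Or.inr ⟨mid, Or.inl rfl, p, hp, hc, hy⟩
          · exact Or.inr ⟨m, Or.inr hm, hrest⟩
        · rintro (h | ⟨m, (rfl | hm), hrest⟩)
          · exact Or.inl (Or.inl h)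
          · exact Or.inl (Or.inr hrest)
          · exact Or.inr ⟨m, hm, hrest⟩
  rw [key]
  exact or_iff_right (by simp [PySem.Set.empty])

-- the crux: for an unshielded sorted pair, "triple in colliders" = "both ends are parents of mid"
theorem pvColliders_iff (vertices : List String) (de ue : List (String × String))
    (mid : String) (hmid : mid ∈ vertices) (l r : String) (hlr : l < r)
    (hshield : ((pvSkeleton vertices de ue).getD l []).contains r = false) :
    ((pvColliders vertices (pvParents vertices de) (pvSkeleton vertices de ue)).contains (l, mid, r)
      = (((pvParents vertices de).getD mid []).contains l
          && ((pvParents vertices de).getD mid []).contains r)) := by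
  have hnd : ((pvParents vertices de).getD mid ([] : PySem.Set String)).Nodup :=
    pvAllNodup_parents vertices de mid
  have hstrict := pvSorted_strict _ hnd
  rcases Bool.eq_false_or_eq_true (((pvParents vertices de).getD mid []).contains l
      && ((pvParents vertices de).getD mid []).contains r) with hb | hb
  · rw [hb]
    obtain ⟨hb1, hb2⟩ := Bool.and_eq_true_iff.mp hb
    rw [PySem.Set.contains_iff, pvMem_colliders]
    refine ⟨mid, hmid, (l, r), ?_, hshield, rfl⟩
    rw [pvMem_pairs2_lt _ hstrict, PySem.List.mem_sorted, PySem.List.mem_sorted]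
    exact ⟨(PySem.Set.contains_iff _ _).mp hb1, (PySem.Set.contains_iff _ _).mp hb2, hlr⟩
  · rw [hb]
    rw [← Bool.not_eq_true, PySem.Set.contains_iff, pvMem_colliders]
    rintro ⟨m, hm, p, hp, hc, he⟩
    injection he with h1 h23; injection h23 with h2 h3
    subst h1; subst h2; subst h3
    have hmem := pvMem_pairs2 _ _ _ hp
    rw [PySem.List.mem_sorted, PySem.List.mem_sorted] at hmem
    rw [(PySem.Set.contains_iff _ _).mpr hmem.1, (PySem.Set.contains_iff _ _).mpr hmem.2] at hb
    simp at hb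

-- ===== VERDICT (by name: the statement is the Claim_ definition above) =====
theorem equiv_non_collider_triples_py_spec : Claim_equal_equiv_non_collider_triples_py := by
  intro vertices de ue _hdom _hpre
  unfold Spec_equiv_non_collider_triples_py
  unfold equiv_non_collider_triples_py equiv_non_collider_triples_py_alt
  apply PySem.List.foldl_congr_mem
  intro acc mid hmid
  apply PySem.List.foldl_congr_mem
  intro acc' p hp
  by_cases h1 : ((pvSkeleton vertices de ue).getD p.1 []).contains p.2 = true
  · rw [if_pos h1, if_pos h1]
  · rw [Bool.not_eq_true] at h1
    have hlt : p.1 < p.2 := by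
      have hndskel : ((pvSkeleton vertices de ue).getD mid ([] : PySem.Set String)).Nodup :=
        pvAllNodup_skeleton vertices de ue mid
      have hstrict := pvSorted_strict _ hndskel
      have := (pvMem_pairs2_lt _ hstrict p.1 p.2).mp (by simpa using hp)
      exact this.2.2
    have hc := pvColliders_iff vertices de ue mid hmid p.1 p.2 hlt h1
    simp only [h1, Bool.false_eq_true, if_false, hc]
    rcases Bool.eq_false_or_eq_true (((pvParents vertices de).getD mid []).contains p.1
        && ((pvParents vertices de).getD mid []).contains p.2) with hb | hb <;>
      rw [hb] <;> simp
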